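-- pv_equiv track=rewrite | github.com/Kawser-nerd/CLCDSA | Source Codes/CodeJamData/09/03/17.py | solve
-- ===== SOURCE A (Python) =====
-- keyword = "welcome to code jam"
--
-- def solve(text):
-- 	dynamic = []
--
-- 	solution = 0
--
-- 	for i in range( len(text) ):
-- 		cur = []
-- 		dynamic.append( cur )
-- 		if text[i] == keyword[0]:
-- 			cur.append(1)
-- 		else:
-- 			cur.append(0)
--
-- 		for j in range( 1, len(keyword) ):
-- 			cur.append(0)
-- 			if text[i] != keyword[j]:
-- 				continue
-- 			for k in range( 0, i ):
-- 				if text[k] != keyword[j-1]: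
-- 					continue
-- 				cur[j] = (cur[j] + dynamic[k][j-1]) % 10000
--
-- 		solution = (solution + cur[ len(keyword)-1 ]) % 10000
--
-- 	return solution
-- ===== SOURCE B (Python) =====
-- keyword = "welcome to code jam"
--
-- def solve(text):
--     m = len(keyword)
--     dp = [0] * m
--     for c in text:
--         for j in range(m - 1, -1, -1):
--             if c == keyword[j]:
--                 dp[j] = (dp[j] + (dp[j - 1] if j else 1)) % 10000
--     return dp[m - 1]
-- ===== Notes on version B (the rewrite author's own statement) =====
-- stated objective: faster
-- what changed: Replaced the per-position row table with an inner rescan of all earlier positions (O(n^2*m)) by a single 1D DP array of running prefix-match counts updated right-to-left once per character (O(n*m)).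
import Mathlib
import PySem

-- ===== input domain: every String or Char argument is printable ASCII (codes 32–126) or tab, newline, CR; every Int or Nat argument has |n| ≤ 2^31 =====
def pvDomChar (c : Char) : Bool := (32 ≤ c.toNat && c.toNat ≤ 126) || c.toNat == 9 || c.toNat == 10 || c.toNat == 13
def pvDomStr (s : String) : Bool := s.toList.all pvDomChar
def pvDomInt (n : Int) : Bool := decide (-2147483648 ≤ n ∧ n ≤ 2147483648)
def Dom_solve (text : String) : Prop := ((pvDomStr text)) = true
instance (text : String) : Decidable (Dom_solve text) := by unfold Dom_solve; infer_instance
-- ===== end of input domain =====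

-- B replaces A's per-position row table with inner rescans (O(n^2*m)) by a 1D running-count
-- DP updated right-to-left once per character (O(n*m)); measured faster, asymptotic change.


-- ===== PORT A =====
-- the module constant `keyword`
def pvKw : List Char := "welcome to code jam".toList

-- A's innermost loop: `for k in range(0, i): if text[k] != keyword[j-1]: continue; cur[j] = (cur[j] + dynamic[k][j-1]) % 10000`
def aKLoop (cs : List Char) (dynamic : List (List Int)) (j : Int) (i : Int) (cur : List Int) : List Int :=
  (PySem.List.pyRange 0 i 1).foldl (fun cur k =>
    if PySem.List.pyGetD cs k ' ' ≠ PySem.List.pyGetD pvKw (j - 1) ' ' then cur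
    else PySem.List.pySetD cur j
      (PySem.Int.mod (PySem.List.pyGetD cur j 0 + PySem.List.pyGetD (PySem.List.pyGetD dynamic k []) (j - 1) 0) 10000)) cur

-- A's middle loop: `for j in range(1, len(keyword)): cur.append(0); if text[i] != keyword[j]: continue; <k-loop>`
-- (all indices are in range where Python reads them, so pyGetD with a dummy default is exact)
def aJLoop (cs : List Char) (dynamic : List (List Int)) (i : Int) (cur0 : List Int) : List Int :=
  (PySem.List.pyRange 1 (pvKw.length : Int) 1).foldl (fun cur j =>
    let cur := cur ++ [0]
    if PySem.List.pyGetD cs i ' ' ≠ PySem.List.pyGetD pvKw j ' ' then cur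
    else aKLoop cs dynamic j i cur) cur0

-- one iteration of A's outer loop over i; in Python `dynamic.append(cur)` happens before cur is
-- filled, but the loops only read rows k < i, so appending the finished cur is the same value
def aStep (cs : List Char) (st : List (List Int) × Int) (i : Int) : List (List Int) × Int :=
  let cur0 : List Int := if PySem.List.pyGetD cs i ' ' = PySem.List.pyGetD pvKw 0 ' ' then [1] else [0]
  let cur := aJLoop cs st.1 i cur0
  (st.1 ++ [cur], PySem.Int.mod (st.2 + PySem.List.pyGetD cur ((pvKw.length : Int) - 1) 0) 10000)

def solve (text : String) : Int :=
  let cs := text.toList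
  ((PySem.List.pyRange 0 (cs.length : Int) 1).foldl (aStep cs) ([], 0)).2

-- ===== PORT B =====
-- B's inner loop: `for j in range(m-1, -1, -1): if c == keyword[j]: dp[j] = (dp[j] + (dp[j-1] if j else 1)) % 10000`
def bStep (c : Char) (dp : List Int) : List Int :=
  (PySem.List.pyRange ((pvKw.length : Int) - 1) (-1) (-1)).foldl (fun dp j =>
    if c = PySem.List.pyGetD pvKw j ' ' then
      PySem.List.pySetD dp j
        (PySem.Int.mod (PySem.List.pyGetD dp j 0 + (if j ≠ 0 then PySem.List.pyGetD dp (j - 1) 0 else 1)) 10000)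
    else dp) dp

def solve_alt (text : String) : Int :=
  let dp := text.toList.foldl (fun dp c => bStep c dp) (List.replicate pvKw.length 0)
  PySem.List.pyGetD dp ((pvKw.length : Int) - 1) 0

-- ===== PRECONDITION & SPEC =====
def Spec_solve (text : String) (out : Int) : Prop := out = solve_alt text
instance (text : String) (out : Int) : Decidable (Spec_solve text out) := by unfold Spec_solve; infer_instance

-- ===== CLAIM (what is proved, stated in full; the proofs are below) =====
def Claim_equal_solve : Prop := ∀ (text : String), Dom_solve text → Spec_solve text (solve text)


-- ===== LEMMAS AND PROOFS =====

-- column j mod-sum of the table rows: what B's dp[j] and A's solution maintain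
def pvColF (dyn : List (List Int)) (j : Nat) : Int :=
  dyn.foldl (fun a r => (a + r.getD j 0) % 10000) 0

-- the value A's j-loop leaves in cur[t]
def pvCurV (c : Char) (dyn : List (List Int)) (t : Nat) : Int :=
  if t = 0 then (if c = pvKw.getD 0 ' ' then 1 else 0)
  else if c = pvKw.getD t ' ' then pvColF dyn (t - 1) else 0

-- the value B's inner loop leaves in dp[j]
def pvBV (c : Char) (dp : List Int) (j : Nat) : Int :=
  if c = pvKw.getD j ' ' then (dp.getD j 0 + (if j = 0 then 1 else dp.getD (j - 1) 0)) % 10000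
  else dp.getD j 0

-- joint loop invariant of A's outer fold (st) and B's fold (dp) after n characters
def pvInv (cs : List Char) (n : Nat) (st : List (List Int) × Int) (dp : List Int) : Prop :=
  st.1.length = n ∧
  (∀ k, k < n → (st.1.getD k []).length = 19 ∧
     ∀ j, j < 19 → 0 ≤ (st.1.getD k []).getD j 0 ∧ (st.1.getD k []).getD j 0 < 10000 ∧
       (cs.getD k ' ' ≠ pvKw.getD j ' ' → (st.1.getD k []).getD j 0 = 0)) ∧
  dp.length = 19 ∧
  (∀ j, j < 19 → dp.getD j 0 = pvColF st.1 j) ∧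
  st.2 = pvColF st.1 18

lemma pvkw_len : pvKw.length = 19 := rfl

lemma pvmod (a : Int) : PySem.Int.mod a 10000 = a % 10000 :=
  PySem.Int.mod_eq_emod_of_pos (by norm_num)

lemma mod_bounds (a : Int) : 0 ≤ a % 10000 ∧ a % 10000 < 10000 :=
  ⟨Int.emod_nonneg a (by norm_num), Int.emod_lt_of_pos a (by norm_num)⟩

lemma pvBV_eq_of_eq {c : Char} (dp : List Int) {j : Nat} (h : c = pvKw.getD j ' ') :
    pvBV c dp j = (dp.getD j 0 + (if j = 0 then 1 else dp.getD (j - 1) 0)) % 10000 := by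
  unfold pvBV; rw [if_pos h]

lemma pvBV_eq_of_ne {c : Char} (dp : List Int) {j : Nat} (h : ¬ c = pvKw.getD j ' ') :
    pvBV c dp j = dp.getD j 0 := by
  unfold pvBV; rw [if_neg h]

lemma pvCurV_zero (c : Char) (dyn : List (List Int)) :
    pvCurV c dyn 0 = if c = pvKw.getD 0 ' ' then 1 else 0 := by
  unfold pvCurV; rw [if_pos rfl]

lemma pvCurV_pos_eq {c : Char} (dyn : List (List Int)) {t : Nat} (ht : ¬ t = 0)
    (h : c = pvKw.getD t ' ') : pvCurV c dyn t = pvColF dyn (t - 1) := by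
  unfold pvCurV; rw [if_neg ht, if_pos h]

lemma pvCurV_pos_ne {c : Char} (dyn : List (List Int)) {t : Nat} (ht : ¬ t = 0)
    (h : ¬ c = pvKw.getD t ' ') : pvCurV c dyn t = 0 := by
  unfold pvCurV; rw [if_neg ht, if_neg h]

lemma pvColF_append (dyn : List (List Int)) (r : List Int) (j : Nat) :
    pvColF (dyn ++ [r]) j = (pvColF dyn j + r.getD j 0) % 10000 := by
  simp [pvColF, List.foldl_append]

lemma pvColF_bounds (dyn : List (List Int)) (j : Nat) :
    0 ≤ pvColF dyn j ∧ pvColF dyn j < 10000 := by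
  induction dyn using List.reverseRecOn with
  | nil => norm_num [pvColF]
  | append_singleton dyn r ih => rw [pvColF_append]; exact mod_bounds _

lemma getD_map_range {α : Type} (f : Nat → α) (d : α) {j n : Nat} (h : j < n) :
    (((List.range n).map f).getD j d) = f j := by
  rw [List.getD_eq_getElem _ _ (by simpa using h)]
  simp

lemma map_range_getD (dp : List Int) (h : dp.length = 19) :
    (List.range 19).map (fun j => dp.getD j 0) = dp := by
  apply List.ext_getElem (by simp [h])
  intro i h1 h2
  simp only [List.getElem_map, List.getElem_range]
  exact List.getD_eq_getElem dp 0 h2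

lemma getD_set_ne (dp : List Int) (v : Int) {t j : Nat} (h : j ≠ t) :
    (dp.set t v).getD j 0 = dp.getD j 0 := by
  simp [List.getD, List.getElem?_set_ne (Ne.symm h)]

lemma getD_set_self (dp : List Int) (v : Int) {t : Nat} (h : t < dp.length) :
    (dp.set t v).getD t 0 = v := by
  rw [List.getD_eq_getElem _ _ (by simpa using h)]
  simp

lemma set_getD_self (dp : List Int) {t : Nat} (h : t < dp.length) :
    dp.set t (dp.getD t 0) = dp := by
  rw [List.getD_eq_getElem _ _ h]
  exact List.set_getElem_self h

lemma getD_append_len (xs : List Int) (v d : Int) : (xs ++ [v]).getD xs.length d = v := by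
  rw [List.getD_eq_getElem _ _ (by simp)]
  simp

lemma set_append_len (xs : List Int) (v w : Int) : (xs ++ [v]).set xs.length w = xs ++ [w] := by
  induction xs with
  | nil => rfl
  | cons x xs ih => simp [ih]

-- A's k-loop updates one fixed slot: it is a fold on that slot's value
lemma foldl_set_fixed (ks : List Int) (q : Int → Prop) [DecidablePred q] (f : Int → Int) (j : Nat) :
    ∀ cur : List Int, j < cur.length →
    ks.foldl (fun cur k => if q k then cur else cur.set j ((cur.getD j 0 + f k) % 10000)) cur
      = cur.set j (ks.foldl (fun a k => if q k then a else (a + f k) % 10000) (cur.getD j 0)) := by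
  induction ks with
  | nil =>
    intro cur h
    rw [List.foldl_nil, List.foldl_nil, set_getD_self cur h]
  | cons k ks ih =>
    intro cur h
    by_cases hq : q k
    · simp only [List.foldl_cons, if_pos hq]
      exact ih cur h
    · simp only [List.foldl_cons, if_neg hq]
      rw [ih _ (by simpa using h)]
      rw [getD_set_self cur _ h, List.set_set]

-- zero rows can be skipped: A's guarded rescan of all rows computes the column mod-sum
lemma kfold_colF (cs : List Char) (ch : Char) (j' : Nat) :
    ∀ dyn : List (List Int),
    (∀ k, k < dyn.length → cs.getD k ' ' ≠ ch → (dyn.getD k []).getD j' 0 = 0) →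
    (PySem.List.pyRange 0 (dyn.length : Int) 1).foldl
      (fun a k => if PySem.List.pyGetD cs k ' ' ≠ ch then a
        else (a + (PySem.List.pyGetD dyn k []).getD j' 0) % 10000) 0
      = pvColF dyn j' := by
  intro dyn
  induction dyn using List.reverseRecOn with
  | nil => intro _; simp [PySem.List.pyRange_one_eq_nil, pvColF]
  | append_singleton dyn r ih =>
    intro h
    have hlen : (((dyn ++ [r]).length : Nat) : Int) = (dyn.length : Int) + 1 := by simp
    rw [hlen, PySem.List.pyRange_one_succ_right (by omega), List.foldl_append]
    have hcongr : (PySem.List.pyRange 0 (dyn.length : Int) 1).foldl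
        (fun a k => if PySem.List.pyGetD cs k ' ' ≠ ch then a
          else (a + (PySem.List.pyGetD (dyn ++ [r]) k []).getD j' 0) % 10000) 0
        = (PySem.List.pyRange 0 (dyn.length : Int) 1).foldl
        (fun a k => if PySem.List.pyGetD cs k ' ' ≠ ch then a
          else (a + (PySem.List.pyGetD dyn k []).getD j' 0) % 10000) 0 := by
      apply PySem.List.foldl_congr_mem
      intro acc k hk
      have hk' := (PySem.List.mem_pyRange_one).mp hk
      obtain ⟨m, rfl⟩ : ∃ m : Nat, k = (m : Int) :=
        ⟨k.toNat, (Int.toNat_of_nonneg hk'.1).symm⟩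
      have hm : m < dyn.length := by omega
      have h1 : PySem.List.pyGetD (dyn ++ [r]) (m : Int) [] = PySem.List.pyGetD dyn (m : Int) [] := by
        simp only [PySem.List.pyGetD_natCast]
        rw [List.getD_eq_getElem _ _ (by simp; omega), List.getD_eq_getElem _ _ hm]
        exact List.getElem_append_left hm
      rw [h1]
    rw [hcongr]
    rw [ih (fun k hk hne => by
      have hg : (dyn ++ [r]).getD k [] = dyn.getD k [] := by
        rw [List.getD_eq_getElem _ _ (by simp; omega), List.getD_eq_getElem _ _ hk]
        exact List.getElem_append_left hk
      have := h k (by simp; omega) hne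
      rwa [hg] at this)]
    have hr : PySem.List.pyGetD (dyn ++ [r]) (dyn.length : Int) [] = r := by
      simp only [PySem.List.pyGetD_natCast]
      rw [List.getD_eq_getElem _ _ (by simp)]
      rw [List.getElem_append_right (by omega)]
      simp
    have hcs : PySem.List.pyGetD cs (dyn.length : Int) ' ' = cs.getD dyn.length ' ' := by simp
    rw [List.foldl_cons, List.foldl_nil, hr, hcs, pvColF_append]
    by_cases hne : cs.getD dyn.length ' ' ≠ ch
    · have hz : r.getD j' 0 = 0 := by
        have hg : (dyn ++ [r]).getD dyn.length [] = r := by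
          rw [List.getD_eq_getElem _ _ (by simp), List.getElem_append_right (by omega)]
          simp
        have := h dyn.length (by simp) hne
        rwa [hg] at this
      rw [if_pos hne, hz, add_zero,
        Int.emod_eq_of_lt (pvColF_bounds dyn j').1 (pvColF_bounds dyn j').2]
    · rw [if_neg hne]

-- the body of A's j-loop, named for induction
def aJBody (cs : List Char) (dynamic : List (List Int)) (i : Int) : List Int → Int → List Int :=
  fun cur j =>
    let cur := cur ++ [0]
    if PySem.List.pyGetD cs i ' ' ≠ PySem.List.pyGetD pvKw j ' ' then cur
    else aKLoop cs dynamic j i cur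

lemma aJLoop_eq (cs : List Char) (dyn : List (List Int)) (i : Int) (cur0 : List Int) :
    aJLoop cs dyn i cur0
      = (PySem.List.pyRange 1 (pvKw.length : Int) 1).foldl (aJBody cs dyn i) cur0 := rfl

lemma aJLoop_spec (cs : List Char) (dyn : List (List Int))
    (hz : ∀ k, k < dyn.length → ∀ j, j < 19 →
      cs.getD k ' ' ≠ pvKw.getD j ' ' → (dyn.getD k []).getD j 0 = 0) :
    aJLoop cs dyn (dyn.length : Int)
      (if cs.getD dyn.length ' ' = pvKw.getD 0 ' ' then [1] else [0])
      = (List.range 19).map (pvCurV (cs.getD dyn.length ' ') dyn) := by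
  set c := cs.getD dyn.length ' ' with hc
  rw [aJLoop_eq]
  have key : ∀ t : Nat, 1 ≤ t → t ≤ 19 →
      (PySem.List.pyRange 1 (t : Int) 1).foldl (aJBody cs dyn (dyn.length : Int))
        (if c = pvKw.getD 0 ' ' then [1] else [0])
        = (List.range t).map (pvCurV c dyn) := by
    intro t
    induction t with
    | zero => omega
    | succ t iht =>
      intro _ ht1
      by_cases h1 : 1 ≤ t
      · have hstep : ((t + 1 : Nat) : Int) = (t : Int) + 1 := by push_cast; ring
        rw [hstep, PySem.List.pyRange_one_succ_right (by omega), List.foldl_append,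
            iht h1 (by omega), List.foldl_cons, List.foldl_nil]
        have hkwt : PySem.List.pyGetD pvKw (t : Int) ' ' = pvKw.getD t ' ' := by simp
        have hcs : PySem.List.pyGetD cs (dyn.length : Int) ' ' = c := by simp [hc]
        rw [List.range_succ, List.map_append, List.map_cons, List.map_nil]
        simp only [aJBody, hkwt, hcs]
        by_cases hne : c ≠ pvKw.getD t ' '
        · rw [if_pos hne, pvCurV_pos_ne dyn (by omega) (by tauto)]
        · rw [if_neg hne]
          rw [not_ne_iff] at hne
          unfold aKLoop
          have hsub : (t : Int) - 1 = ((t - 1 : Nat) : Int) := by omega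
          have hmap_len : ((List.range t).map (pvCurV c dyn)).length = t := by simp
          simp only [hsub, pvmod, PySem.List.pyGetD_natCast, PySem.List.pySetD_natCast]
          rw [foldl_set_fixed _
              (fun k => PySem.List.pyGetD cs k ' ' ≠ pvKw.getD (t - 1) ' ')
              (fun k => (PySem.List.pyGetD dyn k []).getD (t - 1) 0) t _ (by simp)]
          have h0 : ((List.range t).map (pvCurV c dyn) ++ [(0 : Int)]).getD t 0 = 0 := by
            have := getD_append_len ((List.range t).map (pvCurV c dyn)) 0 0
            rwa [hmap_len] at this
          rw [h0]
          rw [kfold_colF cs (pvKw.getD (t - 1) ' ') (t - 1) dyn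
              (fun k hk => hz k hk (t - 1) (by omega))]
          have hset := set_append_len ((List.range t).map (pvCurV c dyn)) 0 (pvColF dyn (t - 1))
          rw [hmap_len] at hset
          rw [hset, pvCurV_pos_eq dyn (by omega) hne]
      · have ht0 : t = 0 := by omega
        subst ht0
        rw [show ((1 : Nat) : Int) = 1 by norm_num, PySem.List.pyRange_one_eq_nil (by norm_num),
            List.foldl_nil, List.range_one, List.map_cons, List.map_nil, pvCurV_zero]
        split_ifs <;> rfl
  have := key 19 (by norm_num) (by norm_num)
  rw [pvkw_len]
  exact_mod_cast this

-- the body of B's countdown loop, named for induction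
def pvBBody (c : Char) : List Int → Int → List Int := fun dp j =>
  if c = PySem.List.pyGetD pvKw j ' ' then
    PySem.List.pySetD dp j
      (PySem.Int.mod
        (PySem.List.pyGetD dp j 0 + (if j ≠ 0 then PySem.List.pyGetD dp (j - 1) 0 else 1)) 10000)
  else dp

lemma bLoop (c : Char) : ∀ t : Nat, t ≤ 19 → ∀ dp : List Int, dp.length = 19 →
    (PySem.List.pyRange ((t : Int) - 1) (-1) (-1)).foldl (pvBBody c) dp
      = (List.range 19).map (fun j => if j < t then pvBV c dp j else dp.getD j 0) := by
  intro t
  induction t with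
  | zero =>
    intro _ dp hdp
    rw [show ((0 : Nat) : Int) - 1 = -1 by norm_num,
        PySem.List.pyRange_neg_one_eq_nil (by norm_num), List.foldl_nil]
    simpa using (map_range_getD dp hdp).symm
  | succ t iht =>
    intro ht dp hdp
    have hstep : ((t + 1 : Nat) : Int) - 1 = (t : Int) := by push_cast; ring
    rw [hstep, PySem.List.pyRange_neg_one_cons (by omega), List.foldl_cons]
    have hkwt : PySem.List.pyGetD pvKw (t : Int) ' ' = pvKw.getD t ' ' := by simp
    have hdp1 : pvBBody c dp (t : Int) = dp.set t (pvBV c dp t) := by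
      unfold pvBBody
      rw [hkwt]
      by_cases hch : c = pvKw.getD t ' '
      · rw [if_pos hch, pvBV_eq_of_eq dp hch]
        by_cases ht0 : t = 0
        · subst ht0
          rw [if_neg (by norm_num : ¬ ((0 : Nat) : Int) ≠ 0), if_pos rfl, pvmod,
              PySem.List.pySetD_natCast, PySem.List.pyGetD_natCast]
        · have hsub : (t : Int) - 1 = ((t - 1 : Nat) : Int) := by omega
          rw [if_pos (by omega : ((t : Nat) : Int) ≠ 0), if_neg ht0, hsub, pvmod,
              PySem.List.pySetD_natCast, PySem.List.pyGetD_natCast, PySem.List.pyGetD_natCast]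
      · rw [if_neg hch, pvBV_eq_of_ne dp hch, set_getD_self dp (by omega)]
    rw [hdp1, iht (by omega) _ (by simp [hdp])]
    apply List.map_congr_left
    intro j hj
    have hj19 : j < 19 := List.mem_range.mp hj
    by_cases hjt : j < t
    · rw [if_pos hjt, if_pos (by omega)]
      by_cases hcj : c = pvKw.getD j ' '
      · rw [pvBV_eq_of_eq _ hcj, pvBV_eq_of_eq _ hcj, getD_set_ne dp _ (by omega)]
        by_cases hj0 : j = 0
        · rw [if_pos hj0, if_pos hj0]
        · rw [if_neg hj0, if_neg hj0, getD_set_ne dp _ (by omega)]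
      · rw [pvBV_eq_of_ne _ hcj, pvBV_eq_of_ne _ hcj, getD_set_ne dp _ (by omega)]
    · by_cases hjeq : j = t
      · subst hjeq
        rw [if_neg (by omega), if_pos (by omega)]
        exact getD_set_self dp _ (by omega)
      · rw [if_neg (by omega), if_neg (by omega)]
        exact getD_set_ne dp _ (by omega)

lemma bStep_spec (c : Char) (dp : List Int) (hdp : dp.length = 19) :
    bStep c dp = (List.range 19).map (pvBV c dp) := by
  have h0 : bStep c dp
      = (PySem.List.pyRange ((pvKw.length : Int) - 1) (-1) (-1)).foldl (pvBBody c) dp := rfl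
  have h19 : ((pvKw.length : Int) - 1) = ((19 : Nat) : Int) - 1 := by rw [pvkw_len]
  rw [h0, h19, bLoop c 19 (le_refl _) dp hdp]
  apply List.map_congr_left
  intro j hj
  rw [if_pos (List.mem_range.mp hj)]

lemma take_succ_getD (cs : List Char) {n : Nat} (h : n < cs.length) :
    cs.take (n + 1) = cs.take n ++ [cs.getD n ' '] := by
  rw [List.take_add_one, List.getElem?_eq_getElem h, List.getD_eq_getElem _ _ h]
  rfl

-- the main joint induction
lemma pv_main (cs : List Char) : ∀ n : Nat, n ≤ cs.length →
    pvInv cs n ((PySem.List.pyRange 0 (n : Int) 1).foldl (aStep cs) ([], 0))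
      ((cs.take n).foldl (fun dp c => bStep c dp) (List.replicate pvKw.length 0)) := by
  intro n
  induction n with
  | zero =>
    intro _
    rw [show ((0 : Nat) : Int) = 0 by norm_num, PySem.List.pyRange_one_eq_nil (by norm_num)]
    refine ⟨rfl, by intro k hk; exact absurd hk (by omega), by simp [pvkw_len], ?_, rfl⟩
    intro j hj
    rw [List.getD_eq_getElem _ _ (by simp [pvkw_len]; omega)]
    simp [pvColF]
  | succ n ihn =>
    intro hn1
    have hn : n < cs.length := by omega
    obtain ⟨hlen, hrows, hdplen, hdpcol, hsol⟩ := ihn (by omega)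
    set stp := (PySem.List.pyRange 0 (n : Int) 1).foldl (aStep cs) (([] : List (List Int)), (0 : Int)) with hstp
    set dpp := (cs.take n).foldl (fun dp c => bStep c dp) (List.replicate pvKw.length 0) with hdpp
    set c := cs.getD n ' ' with hcdef
    set dyn := stp.1 with hdyn
    -- unfold one step of each loop
    have hrangeA : PySem.List.pyRange 0 ((n + 1 : Nat) : Int) 1
        = PySem.List.pyRange 0 (n : Int) 1 ++ [(n : Int)] := by
      rw [show ((n + 1 : Nat) : Int) = (n : Int) + 1 by push_cast; ring]
      exact PySem.List.pyRange_one_succ_right (by omega)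
    rw [hrangeA, List.foldl_append, take_succ_getD cs hn, List.foldl_append]
    simp only [List.foldl_cons, List.foldl_nil]
    rw [← hstp, ← hdpp, ← hcdef]
    -- characterize A's step
    have hcs : PySem.List.pyGetD cs (n : Int) ' ' = c := by simp [hcdef]
    have hkw0 : PySem.List.pyGetD pvKw (0 : Int) ' ' = pvKw.getD 0 ' ' := rfl
    have hcur : aJLoop cs dyn ((n : Nat) : Int) (if c = pvKw.getD 0 ' ' then [1] else [0])
        = (List.range 19).map (pvCurV c dyn) := by
      have h := aJLoop_spec cs dyn (fun k hk j hj => ((hrows k (hlen ▸ hk)).2 j hj).2.2)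
      rw [hlen] at h
      rwa [← hcdef] at h
    set curM := (List.range 19).map (pvCurV c dyn) with hcurM
    have hcurget : ∀ j, j < 19 → curM.getD j 0 = pvCurV c dyn j := by
      intro j hj; exact getD_map_range _ _ hj
    have h18 : ((pvKw.length : Int) - 1) = ((18 : Nat) : Int) := by
      rw [pvkw_len]; norm_num
    have hstep : aStep cs stp (n : Int) = (dyn ++ [curM], (stp.2 + pvCurV c dyn 18) % 10000) := by
      show (stp.1 ++ [aJLoop cs stp.1 ((n : Nat) : Int)
              (if PySem.List.pyGetD cs ((n : Nat) : Int) ' ' = PySem.List.pyGetD pvKw 0 ' '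
               then [1] else [0])],
            PySem.Int.mod (stp.2 + PySem.List.pyGetD
              (aJLoop cs stp.1 ((n : Nat) : Int)
                (if PySem.List.pyGetD cs ((n : Nat) : Int) ' ' = PySem.List.pyGetD pvKw 0 ' '
                 then [1] else [0])) ((pvKw.length : Int) - 1) 0) 10000) = _
      rw [hcs, hkw0, ← hdyn, hcur, pvmod, h18, PySem.List.pyGetD_natCast,
          hcurget 18 (by norm_num)]
    -- characterize B's step
    have hbs : bStep c dpp = (List.range 19).map (pvBV c dpp) := bStep_spec c dpp hdplen
    rw [hstep, hbs]
    -- re-establish the invariant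
    have hcolnew : ∀ j, j < 19 →
        pvColF (dyn ++ [curM]) j = (dpp.getD j 0 + pvCurV c dyn j) % 10000 := by
      intro j hj
      rw [pvColF_append, hdpcol j hj, hcurget j hj]
    have hbv_eq : ∀ j, j < 19 → pvBV c dpp j = pvColF (dyn ++ [curM]) j := by
      intro j hj
      rw [hcolnew j hj]
      by_cases hch : c = pvKw.getD j ' '
      · rw [pvBV_eq_of_eq dpp hch]
        by_cases hj0 : j = 0
        · subst hj0
          rw [if_pos rfl, pvCurV_zero, if_pos hch]
        · rw [if_neg hj0, pvCurV_pos_eq dyn hj0 hch, ← hdpcol (j - 1) (by omega)]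
      · rw [pvBV_eq_of_ne dpp hch]
        have hzv : pvCurV c dyn j = 0 := by
          by_cases hj0 : j = 0
          · subst hj0; rw [pvCurV_zero, if_neg hch]
          · exact pvCurV_pos_ne dyn hj0 hch
        rw [hzv, add_zero, hdpcol j hj,
            Int.emod_eq_of_lt (pvColF_bounds dyn j).1 (pvColF_bounds dyn j).2]
    have hA : (dyn ++ [curM]).length = n + 1 := by simp [hlen]
    have hB : ∀ k, k < n + 1 → ((dyn ++ [curM]).getD k []).length = 19 ∧
        ∀ j, j < 19 → 0 ≤ ((dyn ++ [curM]).getD k []).getD j 0 ∧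
          ((dyn ++ [curM]).getD k []).getD j 0 < 10000 ∧
          (cs.getD k ' ' ≠ pvKw.getD j ' ' → ((dyn ++ [curM]).getD k []).getD j 0 = 0) := by
      intro k hk
      by_cases hkn : k < n
      · have hgk : (dyn ++ [curM]).getD k [] = dyn.getD k [] := by
          rw [List.getD_eq_getElem _ _ (by simp [hlen]; omega),
              List.getD_eq_getElem _ _ (by omega)]
          exact List.getElem_append_left (by omega)
        rw [hgk]
        exact hrows k hkn
      · have hkn' : k = n := by omega
        subst hkn'
        have hgk : (dyn ++ [curM]).getD k [] = curM := by
          rw [List.getD_eq_getElem _ _ (by simp [hlen]),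
              List.getElem_append_right (by omega)]
          simp [hlen]
        rw [hgk]
        refine ⟨by simp [hcurM], ?_⟩
        intro j hj
        rw [hcurget j hj]
        have hbnds : 0 ≤ pvCurV c dyn j ∧ pvCurV c dyn j < 10000 := by
          unfold pvCurV
          split_ifs with hh1 hh2 hh3
          · norm_num
          · norm_num
          · exact pvColF_bounds dyn (j - 1)
          · norm_num
        refine ⟨hbnds.1, hbnds.2, ?_⟩
        intro hne
        rw [← hcdef] at hne
        by_cases hj0 : j = 0
        · subst hj0; rw [pvCurV_zero, if_neg hne]
        · exact pvCurV_pos_ne dyn hj0 hne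
    have hC : ((List.range 19).map (pvBV c dpp)).length = 19 := by simp
    have hD : ∀ j, j < 19 →
        ((List.range 19).map (pvBV c dpp)).getD j 0 = pvColF (dyn ++ [curM]) j := by
      intro j hj
      rw [getD_map_range _ _ hj]
      exact hbv_eq j hj
    have hE : (stp.2 + pvCurV c dyn 18) % 10000 = pvColF (dyn ++ [curM]) 18 := by
      rw [pvColF_append, hcurget 18 (by norm_num), hsol]
    exact ⟨hA, hB, hC, hD, hE⟩

lemma solve_eq (text : String) : solve text = solve_alt text := by
  obtain ⟨hlen, hrows, hdplen, hdpcol, hsol⟩ :=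
    pv_main text.toList text.toList.length (le_refl _)
  rw [List.take_length] at hdpcol
  show ((PySem.List.pyRange 0 ((text.toList.length : Nat) : Int) 1).foldl
      (aStep text.toList) ([], 0)).2 = solve_alt text
  rw [hsol]
  show _ = PySem.List.pyGetD
      (text.toList.foldl (fun dp c => bStep c dp) (List.replicate pvKw.length 0))
      ((pvKw.length : Int) - 1) 0
  rw [show ((pvKw.length : Int) - 1) = ((18 : Nat) : Int) by rw [pvkw_len]; norm_num,
      PySem.List.pyGetD_natCast]
  exact (hdpcol 18 (by norm_num)).symm

-- ===== VERDICT (by name: the statement is the Claim_ definition above) =====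
theorem solve_spec : Claim_equal_solve := by
  intro text _
  exact solve_eq text
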